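-- pv_equiv track=rewrite | github.com/AFD-Illinois/pyharm | pyharm/plots/result_figures.py | _trunc_at_spin
-- ===== SOURCE A (Python) =====
-- def _trunc_at_spin(tag):
--     model_lst = tag.split(" ")
--     model_lst_trunc = []
--     for m in model_lst:
--         if " a" in m or "$a" in m:
--             break
--         model_lst_trunc.append(m)
--     return " ".join(model_lst_trunc)
-- ===== SOURCE B (Python) =====
-- def _trunc_at_spin(tag):
--     i = tag.find("$a")
--     if i < 0:
--         return tag
--     s = tag.rfind(" ", 0, i)
--     return tag[:s] if s >= 0 else ""
-- ===== Notes on version B (the rewrite author's own statement) =====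
-- stated objective: alternative
-- what changed: B replaces the split-into-tokens/accumulate/rejoin loop by direct string arithmetic: find the first '$a', locate the last space before it with rfind, and slice the original string there.
import Mathlib
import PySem

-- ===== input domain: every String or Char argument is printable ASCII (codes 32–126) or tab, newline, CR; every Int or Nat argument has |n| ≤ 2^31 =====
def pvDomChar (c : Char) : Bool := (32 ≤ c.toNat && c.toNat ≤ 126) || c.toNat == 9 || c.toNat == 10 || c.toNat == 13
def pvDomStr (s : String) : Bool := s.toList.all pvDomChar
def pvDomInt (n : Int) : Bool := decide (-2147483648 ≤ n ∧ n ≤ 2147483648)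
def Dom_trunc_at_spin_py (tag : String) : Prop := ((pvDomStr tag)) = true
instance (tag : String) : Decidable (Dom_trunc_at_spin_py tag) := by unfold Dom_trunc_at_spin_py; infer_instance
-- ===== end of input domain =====

-- B truncates by raw-string arithmetic (find '$a', rfind the space before it, slice there)
-- instead of A's split-into-tokens / accumulate-until-marker / rejoin loop; alternative
-- decomposition, same cost.

-- ===== PORT A =====
-- the for/break loop over the split tokens, stopping at the first one containing " a" or "$a"
def truncLoopA : List String → List String
  | [] => []
  | m :: rest =>
    if PySem.Str.isIn " a" m || PySem.Str.isIn "$a" m then []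
    else m :: truncLoopA rest

def trunc_at_spin_py (tag : String) : String :=
  let model_lst := (PySem.Str.split? tag " ").getD []   -- sep " " is non-empty, so split? is `some`
  let model_lst_trunc := truncLoopA model_lst
  PySem.Str.join " " model_lst_trunc

-- ===== PORT B =====
def trunc_at_spin_py_alt (tag : String) : String :=
  let i := PySem.Str.find tag "$a"
  if i < 0 then tag
  else
    let s := PySem.Str.rfindFrom tag " " 0 (some i)
    if 0 ≤ s then PySem.Str.slice tag none (some s) else ""

-- ===== PRECONDITION & SPEC =====
def Spec_trunc_at_spin_py (tag : String) (out : String) : Prop := out = trunc_at_spin_py_alt tag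
instance (tag : String) (out : String) : Decidable (Spec_trunc_at_spin_py tag out) := by unfold Spec_trunc_at_spin_py; infer_instance

-- ===== CLAIM (what is proved, stated in full; the proofs are below) =====
def Claim_equal_trunc_at_spin_py : Prop := ∀ (tag : String), Dom_trunc_at_spin_py tag → Spec_trunc_at_spin_py tag (trunc_at_spin_py tag)

-- ===== LEMMAS AND PROOFS =====

def mySplit : List Char → List (List Char)
  | [] => [[]]
  | c :: rest =>
    if c = ' ' then [] :: mySplit rest
    else match mySplit rest with
      | [] => [[c]]
      | t :: ts => (c :: t) :: ts

theorem mySplit_ne_nil (cs : List Char) : mySplit cs ≠ [] := by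
  cases cs with
  | nil => simp [mySplit]
  | cons c rest =>
    simp only [mySplit]
    split
    · simp
    · split <;> simp

def consHead (x : List Char) : List (List Char) → List (List Char)
  | [] => [x]
  | t :: ts => (x ++ t) :: ts

theorem go_eq (fuel : Nat) : ∀ (l cur : List Char) (acc : List (List Char)), l.length ≤ fuel →
    PySem.Chars.splitOn.go [' '] fuel l cur acc = acc.reverse ++ consHead cur.reverse (mySplit l) := by
  induction fuel with
  | zero =>
    intro l cur acc h
    have : l = [] := by cases l <;> simp_all
    subst this
    simp [PySem.Chars.splitOn.go, consHead, mySplit]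
  | succ fuel ih =>
    intro l cur acc h
    cases l with
    | nil => simp [PySem.Chars.splitOn.go, consHead, mySplit]
    | cons c rest =>
      rw [PySem.Chars.splitOn.go]
      have hlen : rest.length ≤ fuel := by simp at h; omega
      by_cases hc : c = ' '
      · subst hc
        have hp : List.isPrefixOf [' '] (' ' :: rest) = true := by
          simp [List.isPrefixOf]
        have hd : List.drop (List.length [' ']) (' ' :: rest) = rest := by simp
        simp only [hp, if_pos, hd]
        rw [ih rest [] (cur.reverse :: acc) hlen]
        cases hms : mySplit rest with
        | nil => exact absurd hms (mySplit_ne_nil rest)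
        | cons t ts => simp [mySplit, hms, consHead]
      · have hp : List.isPrefixOf [' '] (c :: rest) = false := by
          simp [List.isPrefixOf]
          exact fun h' => absurd h'.symm hc
        simp only [hp, Bool.false_eq_true, if_false]
        rw [ih rest (c :: cur) acc hlen]
        cases hms : mySplit rest with
        | nil => exact absurd hms (mySplit_ne_nil rest)
        | cons t ts => simp [mySplit, hc, hms, consHead]

theorem splitOn_eq_mySplit (cs : List Char) : PySem.Chars.splitOn cs [' '] = mySplit cs := by
  rw [PySem.Chars.splitOn, go_eq _ _ _ _ (by omega)]
  cases hms : mySplit cs with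
  | nil => exact absurd hms (mySplit_ne_nil cs)
  | cons t ts => simp [consHead]

theorem mySplit_mem_no_space {cs t : List Char} (h : t ∈ mySplit cs) : ' ' ∉ t := by
  induction cs generalizing t with
  | nil => simp [mySplit] at h; simp [h]
  | cons c rest ih =>
    simp only [mySplit] at h
    by_cases hc : c = ' '
    · simp [hc] at h
      rcases h with h | h
      · simp [h]
      · exact ih h
    · simp [hc] at h
      cases hms : mySplit rest with
      | nil => exact absurd hms (mySplit_ne_nil rest)
      | cons t0 ts =>
        rw [hms] at h
        simp at h
        rcases h with h | h
        · subst h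
          intro hmem
          simp at hmem
          rcases hmem with h1 | h1
          · exact hc h1.symm
          · exact ih (by simp [hms]) h1
        · exact ih (by simp [hms, h])

theorem mySplit_head (cs : List Char) : ∃ ts, mySplit cs = cs.takeWhile (· ≠ ' ') :: ts := by
  induction cs with
  | nil => exact ⟨[], rfl⟩
  | cons c rest ih =>
    by_cases hc : c = ' '
    · subst hc
      refine ⟨mySplit rest, ?_⟩
      simp [mySplit, List.takeWhile]
    · obtain ⟨ts, hts⟩ := ih
      refine ⟨ts, ?_⟩
      simp [mySplit, hc, hts, List.takeWhile, hc]

theorem mySplit_mem_infix {cs t : List Char} (h : t ∈ mySplit cs) : t <:+: cs := by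
  induction cs generalizing t with
  | nil => simp [mySplit] at h; simp [h]
  | cons c rest ih =>
    simp only [mySplit] at h
    by_cases hc : c = ' '
    · simp [hc] at h
      rcases h with h | h
      · simp [h]
      · exact (ih h).trans ⟨[c], [], by simp⟩
    · simp [hc] at h
      obtain ⟨ts, hts⟩ := mySplit_head rest
      rw [hts] at h
      simp at h
      rcases h with h | h
      · subst h
        have : List.takeWhile (· ≠ ' ') rest <+: rest := List.takeWhile_prefix _
        simpa using (List.cons_prefix_cons.mpr ⟨rfl, this⟩).isInfix
      · have h2 : t <:+: rest := ih (by simp [hts, h])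
        exact h2.trans ⟨[c], [], by simp⟩

theorem join_mySplit (cs : List Char) : PySem.Chars.join [' '] (mySplit cs) = cs := by
  induction cs with
  | nil => simp [mySplit, PySem.Chars.join_singleton]
  | cons c rest ih =>
    by_cases hc : c = ' '
    · subst hc
      cases hms : mySplit rest with
      | nil => exact absurd hms (mySplit_ne_nil rest)
      | cons t ts =>
        simp [mySplit, hms]
        rw [PySem.Chars.join_cons_cons]
        rw [hms] at ih
        simp [ih]
    · cases hms : mySplit rest with
      | nil => exact absurd hms (mySplit_ne_nil rest)
      | cons t ts =>
        simp [mySplit, hc, hms]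
        rw [hms] at ih
        cases ts with
        | nil =>
          simp [PySem.Chars.join_singleton] at ih ⊢
          simp [ih]
        | cons t2 ts2 =>
          rw [PySem.Chars.join_cons_cons] at ih ⊢
          simp at ih ⊢
          simp [ih]

theorem infix_iff_exists_drop {sub s : List Char} : sub <:+: s ↔ ∃ i, sub <+: s.drop i := by
  rw [← PySem.Chars.isIn_iff_infix, ← PySem.Chars.exists_prefix_drop_iff_isIn]

theorem find_eq_coe_iff (s sub : List Char) (n : Nat) :
    PySem.Chars.find s sub = (n : Int) ↔ sub <+: s.drop n ∧ ∀ i < n, ¬ sub <+: s.drop i := by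
  constructor
  · intro h
    have h0 : 0 ≤ PySem.Chars.find s sub := by rw [h]; positivity
    obtain ⟨h1, h2⟩ := PySem.Chars.find_spec h0
    rw [h] at h1 h2
    simp at h1 h2
    exact ⟨h1, h2⟩
  · rintro ⟨h1, h2⟩
    have hne : PySem.Chars.find s sub ≠ -1 := by
      rw [PySem.Chars.find_ne_neg_one_iff]
      exact infix_iff_exists_drop.mpr ⟨n, h1⟩
    have h0 : 0 ≤ PySem.Chars.find s sub := by
      have := PySem.Chars.neg_one_le_find s sub
      omega
    obtain ⟨g1, g2⟩ := PySem.Chars.find_spec h0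
    have hm : (PySem.Chars.find s sub).toNat = n := by
      by_contra hne2
      rcases Nat.lt_or_ge (PySem.Chars.find s sub).toNat n with hlt | hge
      · exact h2 _ hlt g1
      · exact g2 n (by omega) h1
    omega

theorem rfind_go_eq_neg_one_iff (u sub : List Char) (j : Nat) :
    PySem.Chars.rfind.go u sub j = -1 ↔ ∀ i ≤ j, ¬ sub <+: u.drop i := by
  induction j with
  | zero =>
    rw [PySem.Chars.rfind.go]
    constructor
    · intro h i hi
      interval_cases i
      simp only [List.drop_zero]
      intro hcon
      rw [if_pos (List.isPrefixOf_iff_prefix.mpr hcon)] at h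
      exact absurd h (by decide)
    · intro h
      have h0 := h 0 le_rfl
      simp only [List.drop_zero] at h0
      rw [if_neg]
      simp [List.isPrefixOf_iff_prefix, h0]
  | succ j ih =>
    rw [PySem.Chars.rfind.go]
    by_cases hp : List.isPrefixOf sub (u.drop (j+1)) = true
    · simp [hp]
      refine ⟨by omega, fun h => absurd (List.isPrefixOf_iff_prefix.mp hp) (h (j+1) le_rfl)⟩
    · simp [hp, ih]
      constructor
      · intro h i hi
        rcases Nat.lt_or_ge i (j+1) with h2 | h2
        · exact h i (by omega)
        · have : i = j + 1 := by omega
          subst this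
          simpa [List.isPrefixOf_iff_prefix] using hp
      · intro h i hi
        exact h i (by omega)

theorem rfind_go_eq_coe (u sub : List Char) (j n : Nat) (hnj : n ≤ j)
    (h1 : sub <+: u.drop n) (h2 : ∀ i, n < i → i ≤ j → ¬ sub <+: u.drop i) :
    PySem.Chars.rfind.go u sub j = (n : Int) := by
  induction j with
  | zero =>
    have : n = 0 := by omega
    subst this
    rw [PySem.Chars.rfind.go]
    simp only [List.drop_zero] at h1
    simp [List.isPrefixOf_iff_prefix.mpr h1]
  | succ j ih =>
    rw [PySem.Chars.rfind.go]
    rcases Nat.lt_or_ge n (j+1) with hlt | hge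
    · have hp : List.isPrefixOf sub (u.drop (j+1)) = false := by
        rw [Bool.eq_false_iff]
        intro hcon
        exact h2 (j+1) (by omega) le_rfl (List.isPrefixOf_iff_prefix.mp hcon)
      simp [hp]
      exact ih (by omega) (fun i hi hij => h2 i hi (by omega))
    · have : n = j + 1 := by omega
      subst this
      simp [List.isPrefixOf_iff_prefix.mpr h1]

theorem prefix_pair_iff {a b : Char} {v : List Char} :
    [a, b] <+: v ↔ ∃ v', v = a :: b :: v' := by
  constructor
  · rintro ⟨w, hw⟩
    exact ⟨w, by simp [← hw]⟩
  · rintro ⟨v', rfl⟩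
    exact ⟨v', by simp⟩

theorem prefix_single_iff {a : Char} {v : List Char} :
    [a] <+: v ↔ ∃ v', v = a :: v' := by
  constructor
  · rintro ⟨w, hw⟩
    exact ⟨w, by simp [← hw]⟩
  · rintro ⟨v', rfl⟩
    exact ⟨v', by simp⟩

theorem rfind_space_neg_iff (u : List Char) :
    PySem.Chars.rfind u [' '] = -1 ↔ ' ' ∉ u := by
  rw [PySem.Chars.rfind, rfind_go_eq_neg_one_iff, ← List.singleton_infix_iff,
    infix_iff_exists_drop]
  constructor
  · rintro h ⟨i, hi⟩
    by_cases h2 : i ≤ u.length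
    · exact h i h2 hi
    · rw [List.drop_eq_nil_of_le (by omega)] at hi
      exact absurd hi (by simp [prefix_single_iff])
  · intro h i _ hcon
    exact h ⟨i, hcon⟩

theorem rfind_go_spec_fwd (u sub : List Char) (j : Nat)
    (h : PySem.Chars.rfind.go u sub j ≠ -1) :
    ∃ n : Nat, n ≤ j ∧ PySem.Chars.rfind.go u sub j = (n : Int) ∧ sub <+: u.drop n ∧
      ∀ i, n < i → i ≤ j → ¬ sub <+: u.drop i := by
  induction j with
  | zero =>
    rw [PySem.Chars.rfind.go] at h ⊢
    by_cases hp : List.isPrefixOf sub u = true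
    · exact ⟨0, le_rfl, by simp [hp], by simpa using List.isPrefixOf_iff_prefix.mp hp, by omega⟩
    · simp [hp] at h
  | succ j ih =>
    rw [PySem.Chars.rfind.go] at h ⊢
    by_cases hp : List.isPrefixOf sub (u.drop (j+1)) = true
    · refine ⟨j+1, le_rfl, by simp [hp], List.isPrefixOf_iff_prefix.mp hp, by omega⟩
    · simp [hp] at h ⊢
      obtain ⟨n, hn1, hn2, hn3, hn4⟩ := ih h
      refine ⟨n, by omega, hn2, hn3, ?_⟩
      intro i hni hij
      rcases Nat.lt_or_ge i (j+1) with h2 | h2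
      · exact hn4 i hni (by omega)
      · have : i = j + 1 := by omega
        subst this
        exact fun hcon => hp (List.isPrefixOf_iff_prefix.mpr hcon)

theorem rfind_space_append (t w : List Char) :
    PySem.Chars.rfind (t ++ ' ' :: w) [' '] =
      if PySem.Chars.rfind w [' '] = -1 then (t.length : Int)
      else (t.length : Int) + 1 + PySem.Chars.rfind w [' '] := by
  have hdropt : ∀ i : Nat, i ≤ t.length → (t ++ ' ' :: w).drop i = t.drop i ++ ' ' :: w :=
    fun i hi => List.drop_append_of_le_length hi
  split
  · rename_i hneg
    have hw : ' ' ∉ w := (rfind_space_neg_iff w).mp hneg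
    rw [PySem.Chars.rfind]
    apply rfind_go_eq_coe
    · simp
    · rw [hdropt t.length le_rfl]
      simp [prefix_single_iff]
    · intro i hi _
      intro hcon
      have : i - t.length - 1 + (t.length + 1) = i := by omega
      rw [show (t ++ ' ' :: w) = (t ++ [' ']) ++ w by simp, ← this] at hcon
      rw [show i - t.length - 1 + (t.length + 1) = (t ++ [' ']).length + (i - t.length - 1) by simp; omega] at hcon
      rw [List.drop_length_add_append] at hcon
      obtain ⟨v', hv'⟩ := prefix_single_iff.mp hcon
      exact hw (by rw [← List.take_append_drop (i - t.length - 1) w, hv']; simp)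
  · rename_i hpos
    have hgo : PySem.Chars.rfind.go w [' '] w.length ≠ -1 := by
      rw [← PySem.Chars.rfind]; exact hpos
    obtain ⟨n, hn1, hn2, hn3, hn4⟩ := rfind_go_spec_fwd w [' '] w.length hgo
    have hrw : PySem.Chars.rfind w [' '] = (n : Int) := by rw [PySem.Chars.rfind]; exact hn2
    rw [hrw, PySem.Chars.rfind]
    have : (t.length : Int) + 1 + n = ((t.length + 1 + n : Nat) : Int) := by push_cast; ring
    rw [this]
    apply rfind_go_eq_coe
    · simp; omega
    · rw [show (t ++ ' ' :: w) = (t ++ [' ']) ++ w by simp,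
        show t.length + 1 + n = (t ++ [' ']).length + n by simp,
        List.drop_length_add_append]
      exact hn3
    · intro i hi hile
      intro hcon
      have hit : t.length < i := by omega
      rw [show (t ++ ' ' :: w) = (t ++ [' ']) ++ w by simp,
        show i = (t ++ [' ']).length + (i - t.length - 1) by simp; omega,
        List.drop_length_add_append] at hcon
      refine hn4 (i - t.length - 1) (by omega) (by simp at hile; omega) hcon

theorem tw_no_space (u : List Char) : ' ' ∉ u.takeWhile (· ≠ ' ') := by
  intro h
  simpa using List.mem_takeWhile_imp h

theorem take_no_space_prefix_takeWhile (u : List Char) (n : Nat) (h : ' ' ∉ u.take n) :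
    u.take n <+: u.takeWhile (· ≠ ' ') := by
  induction u generalizing n with
  | nil => simp
  | cons c u' ih =>
    cases n with
    | zero => simp
    | succ m =>
      simp only [List.take_succ_cons] at h ⊢
      have hc : c ≠ ' ' := fun hcon => h (by simp [hcon])
      rw [List.takeWhile_cons_of_pos (by simpa using hc)]
      exact List.cons_prefix_cons.mpr ⟨rfl, ih m (fun hcon => h (by simp [hcon]))⟩

theorem no_occ_le (t rest : List Char) (ht : ¬ ['$', 'a'] <:+: t) :
    ∀ i ≤ t.length, ¬ ['$', 'a'] <+: (t ++ ' ' :: rest).drop i := by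
  intro i hi hcon
  rw [List.drop_append_of_le_length hi] at hcon
  obtain ⟨v', hv'⟩ := prefix_pair_iff.mp hcon
  cases hd : t.drop i with
  | nil => rw [hd] at hv'; simp at hv'
  | cons x d' =>
    cases d' with
    | nil => rw [hd] at hv'; simp at hv'
    | cons y d'' =>
      rw [hd] at hv'
      simp at hv'
      apply ht
      rw [infix_iff_exists_drop]
      exact ⟨i, by rw [hd, hv'.1, hv'.2.1]; exact ⟨d'', rfl⟩⟩

theorem occ_transfer (t rest : List Char) (j : Nat) :
    ['$', 'a'] <+: (t ++ ' ' :: rest).drop (t.length + 1 + j) ↔ ['$', 'a'] <+: rest.drop j := by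
  rw [show t ++ ' ' :: rest = (t ++ [' ']) ++ rest by simp,
    show t.length + 1 + j = (t ++ [' ']).length + j by simp,
    List.drop_length_add_append]

theorem mySplit_append (t rest : List Char) (ht : ' ' ∉ t) :
    mySplit (t ++ ' ' :: rest) = t :: mySplit rest := by
  induction t with
  | nil => simp [mySplit]
  | cons c t' ih =>
    have hc : c ≠ ' ' := fun hcon => ht (by simp [hcon])
    have := ih (fun hcon => ht (by simp [hcon]))
    simp only [List.cons_append, mySplit, hc, if_false, this]

theorem isIn_space_a_false (t : List Char) (ht : ' ' ∉ t) :
    PySem.Chars.isIn [' ', 'a'] t = false := by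
  rw [PySem.Chars.isIn_eq_false_iff]
  intro hcon
  exact ht (hcon.subset (by simp))

theorem rfindFrom_zero_unfold (cs : List Char) (n : Nat) (hn : n ≤ cs.length) :
    PySem.Chars.rfindFrom cs [' '] 0 (some (n : Int)) =
      if PySem.Chars.rfind (cs.take n) [' '] = -1 then -1
      else PySem.Chars.rfind (cs.take n) [' '] := by
  rw [PySem.Chars.rfindFrom]
  have h1 : ¬ ((cs.length : Int) < (n : Int)) := by push_cast; omega
  have h2 : ¬ ((n : Int) < 0) := by omega
  have h3 : ((n : Int)).toNat = n := by omega
  simp [h1, h2, h3]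

def loopC : List (List Char) → List (List Char)
  | [] => []
  | t :: ts =>
    if PySem.Chars.isIn [' ', 'a'] t || PySem.Chars.isIn ['$', 'a'] t then []
    else t :: loopC ts

theorem bridge (u : List Char) (n : Nat) (hocc : ['$', 'a'] <+: u.drop n)
    (hmin : ∀ i < n, ¬ ['$', 'a'] <+: u.drop i) :
    (PySem.Chars.rfind (u.take n) [' '] = -1 ↔ ['$', 'a'] <:+: u.takeWhile (· ≠ ' ')) := by
  obtain ⟨v', hv'⟩ := prefix_pair_iff.mp hocc
  have hlen : n + 2 ≤ u.length := by
    have := congrArg List.length hv'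
    simp at this
    omega
  rw [rfind_space_neg_iff]
  constructor
  · intro hns
    -- the first n+2 chars of u are non-space, so u.take (n+2) is a prefix of the first token
    have htake2 : u.take (n + 2) = u.take n ++ ['$', 'a'] := by
      conv_lhs => rw [← List.take_append_drop n u, hv']
      rw [show n + 2 = (u.take n).length + 2 by simp; omega]
      rw [List.take_length_add_append]
      rfl
    have hns2 : ' ' ∉ u.take (n + 2) := by
      rw [htake2]
      intro hmem
      rcases List.mem_append.mp hmem with h | h
      · exact hns h
      · simp at h
    have hpref := take_no_space_prefix_takeWhile u (n + 2) hns2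
    have hdrop := hpref.drop n
    have heq : (u.take (n + 2)).drop n = ['$', 'a'] := by
      rw [htake2]
      exact List.drop_left' (by simp; omega)
    rw [heq] at hdrop
    rw [infix_iff_exists_drop]
    exact ⟨n, hdrop⟩
  · intro htok hsp
    -- an occurrence inside the first token gives an occurrence at index j < token length
    obtain ⟨j, hj⟩ := infix_iff_exists_drop.mp htok
    have hjlen : j + 2 ≤ (u.takeWhile (· ≠ ' ')).length := by
      have := hj.length_le
      rw [List.length_drop] at this
      simp only [List.length_cons, List.length_nil] at this
      omega
    obtain ⟨w, hw⟩ := (List.takeWhile_prefix (l := u) (p := (· ≠ ' ')))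
    have hoccj : ['$', 'a'] <+: u.drop j := by
      rw [← hw, List.drop_append_of_le_length (by omega)]
      exact hj.trans (List.prefix_append _ _)
    have hnj : n ≤ j := by
      by_contra hcon
      exact hmin j (by omega) hoccj
    have htaken : u.take n = (u.takeWhile (· ≠ ' ')).take n := by
      conv_lhs => rw [← hw]
      rw [List.take_append_of_le_length (by omega)]
    rw [htaken] at hsp
    exact tw_no_space u (List.mem_of_mem_take hsp)

def Achars (cs : List Char) : List Char := PySem.Chars.join [' '] (loopC (mySplit cs))

def Bchars (cs : List Char) : List Char :=
  let i := PySem.Chars.find cs ['$', 'a']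
  if i < 0 then cs
  else
    let s := PySem.Chars.rfindFrom cs [' '] 0 (some i)
    if 0 ≤ s then PySem.Chars.slice cs none (some s) else []

theorem occ_len_le {u : List Char} {n : Nat} (h : ['$', 'a'] <+: u.drop n) :
    n + 2 ≤ u.length := by
  obtain ⟨v', hv'⟩ := prefix_pair_iff.mp h
  have := congrArg List.length hv'
  simp at this
  omega

theorem loopC_eq_self (l : List (List Char))
    (h : ∀ t ∈ l, ' ' ∉ t ∧ ¬ ['$', 'a'] <:+: t) : loopC l = l := by
  induction l with
  | nil => rfl
  | cons t ts ih =>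
    obtain ⟨h1, h2⟩ := h t (by simp)
    simp only [loopC]
    rw [if_neg (by simp [isIn_space_a_false t h1, (PySem.Chars.isIn_eq_false_iff _ _).mpr h2])]
    rw [ih (fun t ht => h t (by simp [ht]))]

theorem loopC_cons_good (t : List Char) (ts : List (List Char))
    (h1 : ' ' ∉ t) (h2 : ¬ ['$', 'a'] <:+: t) :
    loopC (t :: ts) = t :: loopC ts := by
  simp only [loopC]
  rw [if_neg (by simp [isIn_space_a_false t h1, (PySem.Chars.isIn_eq_false_iff _ _).mpr h2])]

theorem loopC_cons_bad (t : List Char) (ts : List (List Char))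
    (h2 : ['$', 'a'] <:+: t) : loopC (t :: ts) = [] := by
  simp only [loopC]
  rw [if_pos (by simp [(PySem.Chars.isIn_iff_infix _ _).mpr h2])]

theorem main_aux : ∀ (N : Nat) (cs : List Char), cs.length ≤ N → Bchars cs = Achars cs := by
  intro N
  induction N with
  | zero =>
    intro cs h
    have : cs = [] := by cases cs <;> simp_all
    subst this
    decide
  | succ N ih =>
    intro cs hlen
    by_cases hinf : ['$', 'a'] <:+: cs
    · -- the marker occurs somewhere
      have hne : PySem.Chars.find cs ['$', 'a'] ≠ -1 := (PySem.Chars.find_ne_neg_one_iff _ _).mpr hinf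
      have h0 : 0 ≤ PySem.Chars.find cs ['$', 'a'] := by
        have := PySem.Chars.neg_one_le_find cs ['$', 'a']
        omega
      obtain ⟨hocc, hmin⟩ := PySem.Chars.find_spec h0
      set n : Nat := (PySem.Chars.find cs ['$', 'a']).toNat with hn
      have hfind : PySem.Chars.find cs ['$', 'a'] = (n : Int) := by omega
      have hnlen : n + 2 ≤ cs.length := occ_len_le hocc
      have hBile : ¬ ((n : Int) < 0) := by omega
      by_cases htok : ['$', 'a'] <:+: cs.takeWhile (· ≠ ' ')
      · -- marker in the very first token: both sides give []
        have hr := (bridge cs n hocc hmin).mpr htok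
        obtain ⟨ts, hts⟩ := mySplit_head cs
        rw [Bchars, Achars, hts, loopC_cons_bad _ _ htok, PySem.Chars.join_nil]
        simp only [hfind]
        rw [if_neg hBile, rfindFrom_zero_unfold cs n (by omega), if_pos hr]
        rw [if_neg (by omega)]
      · -- marker beyond the first token
        have hsp : ' ' ∈ cs := by
          by_contra hcon
          exact htok (by rwa [List.takeWhile_eq_self_iff.mpr (fun x hx => by
            simpa using fun hionx : x = ' ' => hcon (hionx ▸ hx))])
        have hcs : cs.takeWhile (· ≠ ' ') ++ cs.dropWhile (· ≠ ' ') = cs :=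
          List.takeWhile_append_dropWhile
        set t := cs.takeWhile (· ≠ ' ') with htdef
        set d := cs.dropWhile (· ≠ ' ') with hddef
        have hdne : d ≠ [] := by
          intro hcon
          rw [hcon, List.append_nil] at hcs
          exact htok (by rw [hcs]; exact hinf)
        have hdhead := List.head_dropWhile_not (· ≠ ' ') hdne
        obtain ⟨x, rest, hd⟩ : ∃ x rest, d = x :: rest := by
          cases hcase : d with
          | nil => exact absurd hcase hdne
          | cons a b => exact ⟨a, b, rfl⟩
        have hx : x = ' ' := by
          have hdw : List.dropWhile (fun x => decide (x ≠ ' ')) cs = x :: rest :=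
            hddef.symm.trans hd
          have h2 := hdhead
          simp only [hddef, hdw, List.head_cons] at h2
          simpa using h2
        subst hx
        have hcs' : cs = t ++ ' ' :: rest := by rw [← hcs, hd]
        have ht_sp : ' ' ∉ t := htdef ▸ tw_no_space cs
        have ht_inf : ¬ ['$', 'a'] <:+: t := htok
        have hngt : t.length + 1 ≤ n := by
          by_contra hcon
          exact no_occ_le t rest ht_inf n (by omega) (hcs' ▸ hocc)
        set n' := n - t.length - 1 with hn'
        have hnsplit : n = t.length + 1 + n' := by omega
        have hocc' : ['$', 'a'] <+: rest.drop n' := by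
          rw [← occ_transfer t rest n', ← hnsplit, ← hcs']
          exact hocc
        have hmin' : ∀ i < n', ¬ ['$', 'a'] <+: rest.drop i := by
          intro i hi hcon
          exact hmin (t.length + 1 + i) (by omega) (by rw [hcs', occ_transfer]; exact hcon)
        have hn'len : n' + 2 ≤ rest.length := occ_len_le hocc'
        have htaken : cs.take n = t ++ ' ' :: rest.take n' := by
          rw [hcs', hnsplit, show t.length + 1 + n' = t.length + (n' + 1) by omega,
            List.take_length_add_append, List.take_succ_cons]
        have hfr : PySem.Chars.find rest ['$', 'a'] = (n' : Int) :=
          (find_eq_coe_iff rest _ n').mpr ⟨hocc', hmin'⟩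
        simp only [Bchars, hfind]
        rw [if_neg hBile, rfindFrom_zero_unfold cs n (by omega), htaken,
          rfind_space_append t (rest.take n')]
        by_cases hr : PySem.Chars.rfind (rest.take n') [' '] = -1
        · rw [if_pos hr, if_neg (by omega : ¬ ((t.length : Int)) = -1),
            if_pos (by omega : (0 : Int) ≤ (t.length : Int)), PySem.Chars.slice,
            PySem.List.slice_to _ (by omega)]
          have hint : ((t.length : Int)).toNat = t.length := by omega
          rw [hint]
          conv_lhs => rw [hcs']
          rw [List.take_left]
          have htokrest : ['$', 'a'] <:+: rest.takeWhile (· ≠ ' ') :=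
            (bridge rest n' hocc' hmin').mp hr
          obtain ⟨ts, hts⟩ := mySplit_head rest
          rw [Achars, hcs', mySplit_append t rest ht_sp, loopC_cons_good t _ ht_sp ht_inf,
            hts, loopC_cons_bad _ _ htokrest, PySem.Chars.join_singleton]
        · rw [if_neg hr]
          have hgo : PySem.Chars.rfind.go (rest.take n') [' '] (rest.take n').length ≠ -1 := by
            rw [← PySem.Chars.rfind]
            exact hr
          obtain ⟨m, hm1, hm2, -, -⟩ := rfind_go_spec_fwd _ _ _ hgo
          have hmval : PySem.Chars.rfind (rest.take n') [' '] = (m : Int) := by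
            rw [PySem.Chars.rfind]
            exact hm2
          rw [hmval, if_neg (by omega : ¬ ((t.length : Int) + 1 + (m : Int)) = -1),
            if_pos (by omega : (0 : Int) ≤ (t.length : Int) + 1 + (m : Int)), PySem.Chars.slice,
            PySem.List.slice_to _ (by omega)]
          have htn : ((t.length : Int) + 1 + (m : Int)).toNat = t.length + (m + 1) := by omega
          rw [htn]
          conv_lhs => rw [hcs']
          rw [List.take_length_add_append, List.take_succ_cons]
          have hntokrest : ¬ ['$', 'a'] <:+: rest.takeWhile (· ≠ ' ') :=
            fun hcon => hr ((bridge rest n' hocc' hmin').mpr hcon)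
          obtain ⟨ts, hts⟩ := mySplit_head rest
          have hrest_len : rest.length ≤ N := by
            have := congrArg List.length hcs'
            simp at this
            omega
          have hBrest : Bchars rest = rest.take m := by
            simp only [Bchars, hfr]
            rw [if_neg (by omega), rfindFrom_zero_unfold rest n' (by omega), if_neg hr, hmval,
              if_pos (by omega), PySem.Chars.slice, PySem.List.slice_to _ (by omega)]
            simp
          have hArest : PySem.Chars.join [' '] (loopC (mySplit rest)) = rest.take m := by
            rw [← Achars, ← ih rest hrest_len, hBrest]
          rw [hts, loopC_cons_good _ _ (tw_no_space rest) hntokrest] at hArest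
          rw [Achars, hcs', mySplit_append t rest ht_sp, loopC_cons_good t _ ht_sp ht_inf,
            hts, loopC_cons_good _ _ (tw_no_space rest) hntokrest,
            PySem.Chars.join_cons_cons, hArest]
          simp
    · -- no marker: B returns the string, A rebuilds it unchanged
      have hfind : PySem.Chars.find cs ['$', 'a'] = -1 := (PySem.Chars.find_eq_neg_one_iff _ _).mpr hinf
      rw [Bchars, Achars]
      simp only [hfind]
      rw [if_pos (by omega)]
      rw [loopC_eq_self _ (fun t ht => ⟨mySplit_mem_no_space ht,
        fun hcon => hinf (hcon.trans (mySplit_mem_infix ht))⟩), join_mySplit]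



theorem truncLoopA_map (l : List (List Char)) :
    truncLoopA (l.map String.ofList) = (loopC l).map String.ofList := by
  induction l with
  | nil => rfl
  | cons t ts ih =>
    simp only [List.map_cons, truncLoopA, loopC]
    have e1 : PySem.Str.isIn " a" (String.ofList t) = PySem.Chars.isIn [' ', 'a'] t := by
      simp [PySem.Str.isIn]
    have e2 : PySem.Str.isIn "$a" (String.ofList t) = PySem.Chars.isIn ['$', 'a'] t := by
      simp [PySem.Str.isIn]
    rw [e1, e2]
    split
    · rfl
    · simp [ih]


theorem A_port_eq (tag : String) : (trunc_at_spin_py tag).toList = Achars tag.toList := by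
  simp only [trunc_at_spin_py]
  have hsplit : PySem.Str.split? tag " " =
      some ((mySplit tag.toList).map String.ofList) := by
    rw [PySem.Str.split?, PySem.Chars.split?]
    rw [show (" " : String).toList = [' '] from rfl]
    simp [splitOn_eq_mySplit]
  rw [hsplit]
  simp only [Option.getD_some]
  rw [truncLoopA_map, PySem.Str.toList_join, Achars]
  rw [show (" " : String).toList = [' '] from rfl, List.map_map]
  have hmap : List.map (String.toList ∘ String.ofList) (loopC (mySplit tag.toList)) =
      loopC (mySplit tag.toList) := by
    simp [Function.comp_def]
  rw [hmap]

theorem B_port_eq (tag : String) : (trunc_at_spin_py_alt tag).toList = Bchars tag.toList := by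
  simp only [trunc_at_spin_py_alt, Bchars]
  rw [show PySem.Str.find tag "$a" = PySem.Chars.find tag.toList ['$', 'a'] from rfl]
  split
  · rfl
  · rw [show PySem.Str.rfindFrom tag " " 0 (some (PySem.Chars.find tag.toList ['$', 'a'])) =
        PySem.Chars.rfindFrom tag.toList [' '] 0 (some (PySem.Chars.find tag.toList ['$', 'a'])) from rfl]
    split
    · rw [PySem.Str.slice, String.toList_ofList, PySem.Chars.slice]
    · rfl

theorem ports_eq (tag : String) : trunc_at_spin_py tag = trunc_at_spin_py_alt tag := by
  apply String.toList_inj.mp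
  rw [A_port_eq, B_port_eq]
  exact (main_aux tag.toList.length tag.toList le_rfl).symm

-- ===== VERDICT (by name: the statement is the Claim_ definition above) =====
theorem trunc_at_spin_py_spec : Claim_equal_trunc_at_spin_py := by
  intro tag _
  exact ports_eq tag
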